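-- pv_equiv track=rewrite | github.com/ds-oliver/FantraxAPI | list_rosters.py | _segment_columns
-- ===== SOURCE A (Python) =====
-- from typing import List, Dict, Tuple
--
-- def _segment_columns(headers: List[str], columns: List[List[str]], max_width: int) -> List[Tuple[List[str], List[List[str]]]]:
--     # Compute desired widths per column
--     desired_widths = []
--     for header, col in zip(headers, columns):
--         max_cell = max([len(cell) for cell in col] + [len(header)])
--         desired_widths.append(min(max(18, max_cell + 2), 36))
--
--     segments = []
--     i = 0
--     while i < len(headers):
--         width_used = 1  # left border
--         j = i
--         while j < len(headers):
--             next_width = desired_widths[j]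
--             # account for column and separator
--             projected = width_used + next_width + 1  # right border if last, vertical sep otherwise similar cost
--             # also add one for the vertical separator between columns
--             if j > i:
--                 projected += 1
--             if projected > max_width:
--                 break
--             width_used = projected
--             j += 1
--         if j == i:
--             # ensure at least one column per segment
--             j = i + 1
--         seg_headers = headers[i:j]
--         seg_columns = columns[i:j]
--         segments.append((seg_headers, seg_columns))
--         i = j
--     return segments
-- ===== SOURCE B (Python) =====
-- from typing import List, Tuple
--
-- def _segment_columns(headers: List[str], columns: List[List[str]], max_width: int) -> List[Tuple[List[str], List[List[str]]]]:
--     widths = [min(max(18, max([len(cell) for cell in col] + [len(header)]) + 2), 36)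
--               for header, col in zip(headers, columns)]
--     segments = []
--     cur_headers: List[str] = []
--     cur_columns: List[List[str]] = []
--     width_used = 1  # left border
--     for header, col, w in zip(headers, columns, widths):
--         projected = width_used + w + 1 + (1 if cur_headers else 0)
--         if projected > max_width and cur_headers:
--             segments.append((cur_headers, cur_columns))
--             cur_headers, cur_columns = [], []
--             width_used = 1
--             projected = width_used + w + 1
--         cur_headers.append(header)
--         cur_columns.append(col)
--         width_used = projected
--     if cur_headers:
--         segments.append((cur_headers, cur_columns))
--     return segments
-- ===== Notes on version B (the rewrite author's own statement) =====
-- stated objective: simpler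
-- what changed: Replaced the index-based nested while loops with slicing by a single streaming pass over zip(headers, columns, widths) that accumulates the current segment and flushes it when the next column would not fit.
import Mathlib
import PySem

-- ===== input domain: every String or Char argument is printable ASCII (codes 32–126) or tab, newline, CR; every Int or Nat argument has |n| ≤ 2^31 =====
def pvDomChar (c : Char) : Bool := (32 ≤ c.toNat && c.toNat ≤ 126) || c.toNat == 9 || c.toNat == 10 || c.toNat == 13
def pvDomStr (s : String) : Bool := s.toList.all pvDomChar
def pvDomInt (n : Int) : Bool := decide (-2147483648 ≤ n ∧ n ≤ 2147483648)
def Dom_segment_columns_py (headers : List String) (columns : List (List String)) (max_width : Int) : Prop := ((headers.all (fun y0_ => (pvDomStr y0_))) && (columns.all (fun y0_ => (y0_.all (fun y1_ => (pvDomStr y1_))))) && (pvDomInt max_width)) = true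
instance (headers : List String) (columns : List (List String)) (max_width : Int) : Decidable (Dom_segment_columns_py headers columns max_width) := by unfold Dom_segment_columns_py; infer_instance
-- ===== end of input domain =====

-- B replaces A's index-based nested while loops (with slicing) by one streaming pass that
-- accumulates the current segment and flushes it when the next column does not fit (objective: simpler).

-- ===== PORT A =====
-- desired widths: max(...) over a nonempty list ported with PySem.List.max? (identity key); .getD 0 is never hit (list nonempty)
def pvWidthsA (headers : List String) (columns : List (List String)) : List Int :=
  (headers.zip columns).map (fun hc =>
    min (max 18 (((PySem.List.max? ((hc.2.map (fun cell => PySem.Str.len cell)) ++ [PySem.Str.len hc.1]) (fun x => x)).getD 0) + 2)) 36)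

-- inner 'while j < len(headers)' loop; desired_widths[j] via pyGet? (in range under Pre_, .getD 0 never hit there)
def pvInnerA (dw : List Int) (n : Nat) (mw : Int) (i : Nat) : Nat → Nat → Int → Nat
  | 0, j, _ => j        -- fuel guard only; never reached when fuel ≥ n - j
  | fuel + 1, j, wu =>
    if j < n then
      let next_width := (PySem.List.pyGet? dw (j : Int)).getD 0
      let p1 := wu + next_width + 1
      let projected := if i < j then p1 + 1 else p1
      if mw < projected then j
      else pvInnerA dw n mw i fuel (j + 1) projected
    else j

-- outer 'while i < len(headers)' loop, carrying the segments accumulator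
def pvOuterA (headers : List String) (columns : List (List String)) (dw : List Int) (mw : Int) :
    Nat → Nat → List (List String × List (List String)) → List (List String × List (List String))
  | 0, _, segs => segs        -- fuel guard only; never reached when fuel ≥ len - i
  | fuel + 1, i, segs =>
    if i < headers.length then
      let j0 := pvInnerA dw headers.length mw i headers.length i 1
      let j := if j0 = i then i + 1 else j0
      pvOuterA headers columns dw mw fuel j
        (segs ++ [(PySem.List.slice headers (some (i : Int)) (some (j : Int)),
                   PySem.List.slice columns (some (i : Int)) (some (j : Int)))])
    else segs

def segment_columns_py (headers : List String) (columns : List (List String)) (max_width : Int) : List (List String × List (List String)) :=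
  pvOuterA headers columns (pvWidthsA headers columns) max_width headers.length 0 []

-- ===== PORT B =====
def pvWidthsB (headers : List String) (columns : List (List String)) : List Int :=
  (headers.zip columns).map (fun hc =>
    min (max 18 (((PySem.List.max? ((hc.2.map (fun cell => PySem.Str.len cell)) ++ [PySem.Str.len hc.1]) (fun x => x)).getD 0) + 2)) 36)

-- one iteration of B's for-loop; state = (segments, cur_headers, cur_columns, width_used)
def pvStepB (mw : Int)
    (st : List (List String × List (List String)) × List String × List (List String) × Int)
    (x : String × List String × Int) :
    List (List String × List (List String)) × List String × List (List String) × Int :=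
  let projected := st.2.2.2 + x.2.2 + 1 + (if st.2.1 ≠ [] then 1 else 0)
  if mw < projected ∧ st.2.1 ≠ [] then
    (st.1 ++ [(st.2.1, st.2.2.1)], [x.1], [x.2.1], 1 + x.2.2 + 1)
  else
    (st.1, st.2.1 ++ [x.1], st.2.2.1 ++ [x.2.1], projected)

-- zip(headers, columns, widths)
def pvZip3 (headers : List String) (columns : List (List String)) (ws : List Int) : List (String × List String × Int) :=
  headers.zip (columns.zip ws)

def segment_columns_py_alt (headers : List String) (columns : List (List String)) (max_width : Int) : List (List String × List (List String)) :=
  let ws := pvWidthsB headers columns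
  let st := (pvZip3 headers columns ws).foldl (pvStepB max_width) ([], [], [], 1)
  if st.2.1 ≠ [] then st.1 ++ [(st.2.1, st.2.2.1)] else st.1

-- ===== PRECONDITION & SPEC =====
-- Pre_ excludes exactly the inputs with fewer columns than headers, on which A always raises
-- IndexError (desired_widths, built by zip, is shorter than the index range of the while loop).
def Pre_segment_columns_py (headers : List String) (columns : List (List String)) (max_width : Int) : Prop :=
  headers.length ≤ columns.length
instance (headers : List String) (columns : List (List String)) (max_width : Int) : Decidable (Pre_segment_columns_py headers columns max_width) := by unfold Pre_segment_columns_py; infer_instance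

def pvWitness_segment_columns_py : List String × List (List String) × Int :=
  (["name", "team"], [["alice", "bob"], ["x"]], 80)

def Spec_segment_columns_py (headers : List String) (columns : List (List String)) (max_width : Int) (out : List (List String × List (List String))) : Prop := out = segment_columns_py_alt headers columns max_width
instance (headers : List String) (columns : List (List String)) (max_width : Int) (out : List (List String × List (List String))) : Decidable (Spec_segment_columns_py headers columns max_width out) := by unfold Spec_segment_columns_py; infer_instance

-- ===== CLAIM (what is proved, stated in full; the proofs are below) =====
def Claim_equal_segment_columns_py : Prop := ∀ (headers : List String) (columns : List (List String)) (max_width : Int), Dom_segment_columns_py headers columns max_width → Pre_segment_columns_py headers columns max_width → Spec_segment_columns_py headers columns max_width (segment_columns_py headers columns max_width)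


-- ===== LEMMAS AND PROOFS =====

theorem pvInnerA_ge (dw : List Int) (n : Nat) (mw : Int) (i fuel j : Nat) (wu : Int)
    (h : ¬ j < n) : pvInnerA dw n mw i fuel j wu = j := by
  cases fuel <;> simp [pvInnerA, h]

theorem pvInnerA_fuel (dw : List Int) (n : Nat) (mw : Int) (i : Nat) :
    ∀ (f1 f2 j : Nat) (wu : Int), n - j ≤ f1 → n - j ≤ f2 →
      pvInnerA dw n mw i f1 j wu = pvInnerA dw n mw i f2 j wu := by
  intro f1
  induction f1 with
  | zero =>
    intro f2 j wu h1 h2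
    rw [pvInnerA_ge dw n mw i 0 j wu (by omega), pvInnerA_ge dw n mw i f2 j wu (by omega)]
  | succ f ih =>
    intro f2 j wu h1 h2
    by_cases h : j < n
    · cases f2 with
      | zero => omega
      | succ g =>
        simp only [pvInnerA, if_pos h]
        split <;> split
        · rfl
        · exact ih g (j + 1) _ (by omega) (by omega)
        · rfl
        · exact ih g (j + 1) _ (by omega) (by omega)
    · rw [pvInnerA_ge dw n mw i (f + 1) j wu h, pvInnerA_ge dw n mw i f2 j wu h]

theorem pvInnerA_lt (dw : List Int) (n : Nat) (mw : Int) (i fuel j : Nat) (wu : Int)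
    (h : j < n) (hf : n - j ≤ fuel) :
    pvInnerA dw n mw i fuel j wu =
      (if mw < (if i < j then wu + (PySem.List.pyGet? dw (j : Int)).getD 0 + 1 + 1
                else wu + (PySem.List.pyGet? dw (j : Int)).getD 0 + 1) then j
       else pvInnerA dw n mw i fuel (j + 1)
         (if i < j then wu + (PySem.List.pyGet? dw (j : Int)).getD 0 + 1 + 1
          else wu + (PySem.List.pyGet? dw (j : Int)).getD 0 + 1)) := by
  cases fuel with
  | zero => omega
  | succ f =>
    simp only [pvInnerA, if_pos h]
    split <;> split
    · rfl
    · exact pvInnerA_fuel dw n mw i f (f + 1) (j + 1) _ (by omega) (by omega)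
    · rfl
    · exact pvInnerA_fuel dw n mw i f (f + 1) (j + 1) _ (by omega) (by omega)

theorem pvInnerA_bounds (dw : List Int) (n : Nat) (mw : Int) (i : Nat) :
    ∀ (fuel j : Nat) (wu : Int), j ≤ n →
      j ≤ pvInnerA dw n mw i fuel j wu ∧ pvInnerA dw n mw i fuel j wu ≤ n := by
  intro fuel
  induction fuel with
  | zero => intro j wu hj; simp [pvInnerA]; omega
  | succ f ih =>
    intro j wu hj
    by_cases h : j < n
    · simp only [pvInnerA, if_pos h]
      by_cases hij : i < j
      · simp only [if_pos hij]
        split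
        · omega
        · have := ih (j + 1) (wu + (PySem.List.pyGet? dw (j : Int)).getD 0 + 1 + 1) (by omega)
          omega
      · simp only [if_neg hij]
        split
        · omega
        · have := ih (j + 1) (wu + (PySem.List.pyGet? dw (j : Int)).getD 0 + 1) (by omega)
          omega
    · rw [pvInnerA_ge dw n mw i (f + 1) j wu h]; omega


-- finalize B's fold state
def pvFin (st : List (List String × List (List String)) × List String × List (List String) × Int) : List (List String × List (List String)) :=
  if st.2.1 ≠ [] then st.1 ++ [(st.2.1, st.2.2.1)] else st.1

theorem pvWidths_ge (headers : List String) (columns : List (List String)) :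
    ∀ w ∈ pvWidthsA headers columns, (18 : Int) ≤ w := by
  intro w hw
  simp only [pvWidthsA, List.mem_map] at hw
  obtain ⟨hc, -, rfl⟩ := hw
  simp [le_min_iff, le_max_iff]

theorem pvZip3_length (headers : List String) (columns : List (List String)) (ws : List Int)
    (hl : headers.length ≤ columns.length) (hws : ws.length = headers.length) :
    (pvZip3 headers columns ws).length = headers.length := by
  simp [pvZip3]; omega

theorem pvZip3_getElem (headers : List String) (columns : List (List String)) (ws : List Int)
    (hl : headers.length ≤ columns.length) (hws : ws.length = headers.length)
    (j : Nat) (hj : j < headers.length) :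
    (pvZip3 headers columns ws)[j]'(by rw [pvZip3_length headers columns ws hl hws]; exact hj)
      = (headers[j], columns[j]'(by omega), ws[j]'(by omega)) := by
  simp [pvZip3]

-- snoc form of the growing slice
theorem pv_take_snoc (l : List α) (i j : Nat) (hij : i ≤ j) (hj : j < l.length) :
    (l.drop i).take (j - i) ++ [l[j]] = (l.drop i).take (j + 1 - i) := by
  have h1 : j + 1 - i = (j - i) + 1 := by omega
  rw [h1, List.take_succ]
  have h2 : (l.drop i)[j - i]? = some l[j] := by
    rw [List.getElem?_drop]
    have : i + (j - i) = j := by omega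
    rw [this, List.getElem?_eq_getElem hj]
  simp [h2]

theorem pv_take_ne_nil (l : List α) (i j : Nat) (hij : i < j) (hj : i < l.length) :
    (l.drop i).take (j - i) ≠ [] := by
  have : ((l.drop i).take (j - i)).length = min (j - i) (l.length - i) := by simp
  intro h
  rw [h] at this
  simp at this
  omega

-- inner-loop correspondence: folding B's step over items j..k-1 (k = pvInnerA's result)
-- extends the current segment exactly, and at k either the list ends or the next column does not fit
theorem pvL1 (headers : List String) (columns : List (List String)) (ws : List Int) (mw : Int)
    (hl : headers.length ≤ columns.length) (hws : ws.length = headers.length)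
    (fuel i j : Nat) (wu : Int) (segs : List (List String × List (List String)))
    (hij : i < j) (hjn : j ≤ headers.length) (hf : headers.length - j ≤ fuel) :
    ∃ wuK,
      ((pvZip3 headers columns ws).drop j).foldl (pvStepB mw)
          (segs, (headers.drop i).take (j - i), (columns.drop i).take (j - i), wu)
        = ((pvZip3 headers columns ws).drop (pvInnerA ws headers.length mw i fuel j wu)).foldl (pvStepB mw)
          (segs, (headers.drop i).take (pvInnerA ws headers.length mw i fuel j wu - i),
                 (columns.drop i).take (pvInnerA ws headers.length mw i fuel j wu - i), wuK)
      ∧ j ≤ pvInnerA ws headers.length mw i fuel j wu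
      ∧ pvInnerA ws headers.length mw i fuel j wu ≤ headers.length
      ∧ (pvInnerA ws headers.length mw i fuel j wu < headers.length →
           mw < wuK + ws.getD (pvInnerA ws headers.length mw i fuel j wu) 0 + 2) := by
  by_cases h : j < headers.length
  · have hjw : j < ws.length := by omega
    have hget : (PySem.List.pyGet? ws (j : Int)).getD 0 = ws[j] := by
      simp [PySem.List.pyGet?_natCast, List.getElem?_eq_getElem hjw]
    rw [pvInnerA_lt ws headers.length mw i fuel j wu h hf]
    simp only [if_pos hij]
    by_cases hbr : mw < wu + (PySem.List.pyGet? ws (j : Int)).getD 0 + 1 + 1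
    · rw [if_pos hbr]
      refine ⟨wu, rfl, le_refl _, by omega, ?_⟩
      intro hk
      rw [List.getD_eq_getElem ws 0 hjw, ← hget]
      omega
    · rw [if_neg hbr]
      have hdrop : (pvZip3 headers columns ws).drop j
          = (pvZip3 headers columns ws)[j]'(by rw [pvZip3_length headers columns ws hl hws]; exact h)
            :: (pvZip3 headers columns ws).drop (j + 1) :=
        List.drop_eq_getElem_cons (by rw [pvZip3_length headers columns ws hl hws]; exact h)
      have hz := pvZip3_getElem headers columns ws hl hws j h
      have hne := pv_take_ne_nil headers i j hij (by omega)
      have hstep : pvStepB mw (segs, (headers.drop i).take (j - i), (columns.drop i).take (j - i), wu)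
            ((pvZip3 headers columns ws)[j]'(by rw [pvZip3_length headers columns ws hl hws]; exact h))
          = (segs, (headers.drop i).take (j + 1 - i), (columns.drop i).take (j + 1 - i),
             wu + (PySem.List.pyGet? ws (j : Int)).getD 0 + 1 + 1) := by
        rw [hz]
        simp only [pvStepB, hne]
        rw [if_neg (by rw [hget] at hbr; simp; intro hmw; omega)]
        rw [pv_take_snoc headers i j (by omega) h, pv_take_snoc columns i j (by omega) (by omega)]
        rw [if_pos hne, hget]
      rw [hdrop, List.foldl_cons, hstep]
      have hrec := pvL1 headers columns ws mw hl hws fuel i (j + 1)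
        (wu + (PySem.List.pyGet? ws (j : Int)).getD 0 + 1 + 1) segs (by omega) (by omega) (by omega)
      obtain ⟨wuK, heq, hle, hlen, hterm⟩ := hrec
      exact ⟨wuK, heq, by omega, hlen, hterm⟩
  · rw [pvInnerA_ge ws headers.length mw i fuel j wu h]
    exact ⟨wu, rfl, le_refl _, by omega, fun hk => absurd hk h⟩
termination_by headers.length - j

-- a pending non-empty segment whose next column does not fit behaves like a flushed segment plus a fresh start
theorem pvFlush (headers : List String) (columns : List (List String)) (ws : List Int) (mw : Int)
    (hl : headers.length ≤ columns.length) (hws : ws.length = headers.length)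
    (p : Nat) (hp : p ≤ headers.length)
    (segs : List (List String × List (List String))) (curh : List String)
    (curc : List (List String)) (wu : Int) (hne : curh ≠ [])
    (hterm : p < headers.length → mw < wu + ws.getD p 0 + 2) :
    pvFin (((pvZip3 headers columns ws).drop p).foldl (pvStepB mw) (segs, curh, curc, wu))
      = pvFin (((pvZip3 headers columns ws).drop p).foldl (pvStepB mw) (segs ++ [(curh, curc)], [], [], 1)) := by
  by_cases h : p < headers.length
  · have hpw : p < ws.length := by omega
    have hdrop : (pvZip3 headers columns ws).drop p
        = (pvZip3 headers columns ws)[p]'(by rw [pvZip3_length headers columns ws hl hws]; exact h)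
          :: (pvZip3 headers columns ws).drop (p + 1) :=
      List.drop_eq_getElem_cons (by rw [pvZip3_length headers columns ws hl hws]; exact h)
    have hz := pvZip3_getElem headers columns ws hl hws p h
    have hgd : ws.getD p 0 = ws[p] := List.getD_eq_getElem ws 0 hpw
    rw [hdrop, List.foldl_cons, List.foldl_cons]
    have hstep1 : pvStepB mw (segs, curh, curc, wu)
          ((pvZip3 headers columns ws)[p]'(by rw [pvZip3_length headers columns ws hl hws]; exact h))
        = (segs ++ [(curh, curc)], [headers[p]], [columns[p]'(by omega)], 1 + ws[p] + 1) := by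
      rw [hz]
      simp only [pvStepB, hne]
      rw [if_pos ⟨by rw [if_pos hne]; rw [hgd] at hterm; have := hterm h; omega, hne⟩]
    have hstep2 : pvStepB mw (segs ++ [(curh, curc)], [], [], 1)
          ((pvZip3 headers columns ws)[p]'(by rw [pvZip3_length headers columns ws hl hws]; exact h))
        = (segs ++ [(curh, curc)], [headers[p]], [columns[p]'(by omega)], 1 + ws[p] + 1) := by
      rw [hz]
      simp [pvStepB]
    rw [hstep1, hstep2]
  · have hnil : (pvZip3 headers columns ws).drop p = [] := by
      apply List.drop_eq_nil_of_le
      rw [pvZip3_length headers columns ws hl hws]; omega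
    rw [hnil]
    simp [pvFin, hne]

-- one step of B's fold from a fresh segment state
theorem pvFresh (headers : List String) (columns : List (List String)) (ws : List Int) (mw : Int)
    (hl : headers.length ≤ columns.length) (hws : ws.length = headers.length)
    (p : Nat) (h : p < headers.length)
    (segs : List (List String × List (List String))) :
    ((pvZip3 headers columns ws).drop p).foldl (pvStepB mw) (segs, [], [], 1)
      = ((pvZip3 headers columns ws).drop (p + 1)).foldl (pvStepB mw)
          (segs, (headers.drop p).take (p + 1 - p), (columns.drop p).take (p + 1 - p), 1 + ws[p]'(by omega) + 1) := by
  have hdrop : (pvZip3 headers columns ws).drop p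
      = (pvZip3 headers columns ws)[p]'(by rw [pvZip3_length headers columns ws hl hws]; exact h)
        :: (pvZip3 headers columns ws).drop (p + 1) :=
    List.drop_eq_getElem_cons (by rw [pvZip3_length headers columns ws hl hws]; exact h)
  rw [hdrop, List.foldl_cons]
  congr 1
  rw [pvZip3_getElem headers columns ws hl hws p h]
  have h1 : (headers.drop p).take (p + 1 - p) = [headers[p]] := by
    rw [← pv_take_snoc headers p p (le_refl p) h]
    simp
  have h2 : (columns.drop p).take (p + 1 - p) = [columns[p]'(by omega)] := by
    rw [← pv_take_snoc columns p p (le_refl p) (by omega)]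
    simp
  rw [h1, h2]
  simp [pvStepB]

-- one unfolding of the outer while loop
theorem pvOuterA_step (headers : List String) (columns : List (List String)) (dw : List Int)
    (mw : Int) (fuel i : Nat) (segs : List (List String × List (List String)))
    (h : i < headers.length) :
    pvOuterA headers columns dw mw (fuel + 1) i segs =
      pvOuterA headers columns dw mw fuel
        (if pvInnerA dw headers.length mw i headers.length i 1 = i then i + 1
         else pvInnerA dw headers.length mw i headers.length i 1)
        (segs ++ [(PySem.List.slice headers (some (i : Int))
                     (some ((if pvInnerA dw headers.length mw i headers.length i 1 = i then i + 1
                             else pvInnerA dw headers.length mw i headers.length i 1 : Nat) : Int)),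
                   PySem.List.slice columns (some (i : Int))
                     (some ((if pvInnerA dw headers.length mw i headers.length i 1 = i then i + 1
                             else pvInnerA dw headers.length mw i headers.length i 1 : Nat) : Int)))]) := by
  simp only [pvOuterA, if_pos h]

theorem pvOuterA_exit (headers : List String) (columns : List (List String)) (dw : List Int)
    (mw : Int) (fuel i : Nat) (segs : List (List String × List (List String)))
    (h : ¬ i < headers.length) :
    pvOuterA headers columns dw mw fuel i segs = segs := by
  cases fuel <;> simp [pvOuterA, h]

-- outer-loop correspondence
theorem pvM (headers : List String) (columns : List (List String)) (ws : List Int) (mw : Int)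
    (hl : headers.length ≤ columns.length) (hws : ws.length = headers.length)
    (hw18 : ∀ w ∈ ws, (18 : Int) ≤ w)
    (fuel i : Nat) (segs : List (List String × List (List String)))
    (hin : i ≤ headers.length) (hf : headers.length - i ≤ fuel) :
    pvOuterA headers columns ws mw fuel i segs
      = pvFin (((pvZip3 headers columns ws).drop i).foldl (pvStepB mw) (segs, [], [], 1)) := by
  by_cases h : i < headers.length
  · cases fuel with
    | zero => omega
    | succ f =>
      have hiw : i < ws.length := by omega
      have hget : (PySem.List.pyGet? ws (i : Int)).getD 0 = ws[i] := by
        simp [PySem.List.pyGet?_natCast, List.getElem?_eq_getElem hiw]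
      have hinner := pvInnerA_lt ws headers.length mw i headers.length i 1 h (by omega)
      rw [if_neg (lt_irrefl i)] at hinner
      rw [pvOuterA_step headers columns ws mw f i segs h, hinner]
      rw [pvFresh headers columns ws mw hl hws i h segs]
      by_cases hbr : mw < 1 + (PySem.List.pyGet? ws (i : Int)).getD 0 + 1
      · rw [if_pos hbr] at hinner ⊢
        rw [if_pos rfl]
        rw [pvM headers columns ws mw hl hws hw18 f (i + 1) _ (by omega) (by omega)]
        rw [PySem.List.slice_natCast headers i (i + 1), PySem.List.slice_natCast columns i (i + 1)]
        rw [pvFlush headers columns ws mw hl hws (i + 1) (by omega) segs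
              ((headers.drop i).take (i + 1 - i)) ((columns.drop i).take (i + 1 - i))
              (1 + ws[i]'(by omega) + 1)
              (pv_take_ne_nil headers i (i + 1) (by omega) (by omega))
              (by
                intro hp
                rw [List.getD_eq_getElem ws 0 (by omega)]
                have h18 := hw18 (ws[i + 1]'(by omega)) (List.getElem_mem (by omega))
                rw [hget] at hbr
                omega)]
      · rw [if_neg hbr] at hinner ⊢
        have hb := pvInnerA_bounds ws headers.length mw i headers.length (i + 1)
          (1 + (PySem.List.pyGet? ws (i : Int)).getD 0 + 1) (by omega)
        rw [if_neg (show ¬ pvInnerA ws headers.length mw i headers.length (i + 1)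
              (1 + (PySem.List.pyGet? ws (i : Int)).getD 0 + 1) = i by omega)]
        obtain ⟨wuK, heq, hge, hlen, hterm⟩ := pvL1 headers columns ws mw hl hws headers.length i (i + 1)
          (1 + (PySem.List.pyGet? ws (i : Int)).getD 0 + 1) segs (by omega) (by omega) (by omega)
        rw [pvM headers columns ws mw hl hws hw18 f
          (pvInnerA ws headers.length mw i headers.length (i + 1) (1 + (PySem.List.pyGet? ws (i : Int)).getD 0 + 1))
          _ hlen (by omega)]
        rw [PySem.List.slice_natCast headers i _, PySem.List.slice_natCast columns i _]
        rw [show (1 + ws[i]'(by omega) + 1 : Int)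
              = 1 + (PySem.List.pyGet? ws (i : Int)).getD 0 + 1 from by rw [hget]]
        rw [heq]
        rw [pvFlush headers columns ws mw hl hws _ hlen segs _ _ wuK
              (pv_take_ne_nil headers i _ (by omega) (by omega)) hterm]
  · rw [pvOuterA_exit headers columns ws mw fuel i segs h]
    have hnil : (pvZip3 headers columns ws).drop i = [] := by
      apply List.drop_eq_nil_of_le
      rw [pvZip3_length headers columns ws hl hws]; omega
    rw [hnil]
    simp [pvFin]
termination_by fuel

-- ===== VERDICT (by name: the statement is the Claim_ definition above) =====
theorem segment_columns_py_spec : Claim_equal_segment_columns_py := by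
  intro headers columns max_width _hdom hpre
  unfold Spec_segment_columns_py
  have hws : (pvWidthsA headers columns).length = headers.length := by
    simp [pvWidthsA, Pre_segment_columns_py] at *
    omega
  have hB : pvWidthsB headers columns = pvWidthsA headers columns := rfl
  show segment_columns_py headers columns max_width = _
  rw [segment_columns_py, segment_columns_py_alt]
  rw [hB]
  rw [pvM headers columns (pvWidthsA headers columns) max_width hpre hws
    (pvWidths_ge headers columns) headers.length 0 [] (by omega) (by omega)]
  rfl
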